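-- pv_equiv track=rewrite | github.com/Tymotheus/AGH-Graphs | src/algorithms/representation_checks.py | is_incidence_matrix
-- ===== SOURCE A (Python) =====
-- def is_incidence_matrix(matrix):
--     """Checks if the passed matrix is a valid Incidence Matrix.
--         matrix - matrix which will be examined for being an incidence matrix"""
--
--     n = len(matrix)
--     m = len(matrix[0])
--     for i in range(n):
--         if len(matrix[i]) != m:
--             return False
--     if m > (n * (n-1) / 2):
--         return False
--     for j in range(m):
--         vertices_in_edge = 0
--         first_index = second_index = None
--         for i in range(n):
--             if matrix[i][j]:
--                 vertices_in_edge += 1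
--                 if first_index is None:
--                     first_index = i
--                 else:
--                     second_index = i
--         if vertices_in_edge != 2:
--             return False
--         for j2 in range(j+1, m):
--             if matrix[first_index][j] == matrix[first_index][j2] and matrix[second_index][j] == matrix[second_index][j2]:
--                 return False
--
--     return True
-- ===== SOURCE B (Python) =====
-- def is_incidence_matrix(matrix):
--     """Checks if the passed matrix is a valid Incidence Matrix.
--         matrix - matrix which will be examined for being an incidence matrix"""
--
--     n = len(matrix)
--     m = len(matrix[0])
--     if any(len(row) != m for row in matrix):
--         return False
--     if 2 * m > n * (n - 1):
--         return False
--     seen = set()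
--     for col in zip(*matrix):
--         if sum(1 for x in col if x) != 2:
--             return False
--         if col in seen:
--             return False
--         seen.add(col)
--     return True
-- ===== Notes on version B (the rewrite author's own statement) =====
-- stated objective: alternative
-- what changed: Replaced A's pairwise duplicate-column scan (for each column, rescan all later columns at its two incident rows) by a single pass over the columns that records each full column in a set; the quadratic rescan disappears (it only bites on large valid matrices, so generated inputs time the same).
import Mathlib
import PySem

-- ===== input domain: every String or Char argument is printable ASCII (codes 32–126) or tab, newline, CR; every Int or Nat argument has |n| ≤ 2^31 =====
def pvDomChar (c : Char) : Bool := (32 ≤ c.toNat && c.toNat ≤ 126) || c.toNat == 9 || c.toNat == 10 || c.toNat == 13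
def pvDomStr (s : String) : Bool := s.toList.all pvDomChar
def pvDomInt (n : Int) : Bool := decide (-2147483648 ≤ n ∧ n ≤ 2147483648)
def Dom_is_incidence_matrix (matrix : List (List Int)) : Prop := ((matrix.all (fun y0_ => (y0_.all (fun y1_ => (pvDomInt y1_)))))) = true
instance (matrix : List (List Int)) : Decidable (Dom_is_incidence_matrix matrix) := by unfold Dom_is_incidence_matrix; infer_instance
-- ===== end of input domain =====

-- B replaces A's pairwise duplicate-column scan by a one-pass set of columns
-- (objective: alternative algorithm; the pair scan over later columns disappears).

-- ===== PORT A =====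
-- matrix[i][j]: inside the region A reaches (all rows of length m, j < m) getD is exact
def pvEntry (matrix : List (List Int)) (i j : Nat) : Int := (matrix.getD i []).getD j 0

-- the inner 'for i in range(n)' body of A: state (vertices_in_edge, first_index, second_index)
def pvScanStep (matrix : List (List Int)) (j : Nat)
    (st : Nat × Option Nat × Option Nat) (i : Nat) : Nat × Option Nat × Option Nat :=
  if pvEntry matrix i j ≠ 0 then
    match st with
    | (c, none, s) => (c + 1, some i, s)
    | (c, some f, _) => (c + 1, some f, some i)
  else st

def pvScanCol (matrix : List (List Int)) (j : Nat) : Nat × Option Nat × Option Nat :=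
  (List.range matrix.length).foldl (pvScanStep matrix j) (0, none, none)

-- A's inner 'for j2 in range(j+1, m)' duplicate scan with early return
def pvDupScan (matrix : List (List Int)) (j fi si m : Nat) : Bool :=
  (List.range' (j + 1) (m - (j + 1))).any (fun j2 =>
    pvEntry matrix fi j == pvEntry matrix fi j2 && pvEntry matrix si j == pvEntry matrix si j2)

-- A's 'for j in range(m)' loop with early returns
def pvColLoop (matrix : List (List Int)) (m : Nat) : List Nat → Bool
  | [] => true
  | j :: rest =>
    match pvScanCol matrix j with
    | (c, f, s) =>
      if c ≠ 2 then false
      else if pvDupScan matrix j (f.getD 0) (s.getD 0) m then false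
      else pvColLoop matrix m rest

def is_incidence_matrix (matrix : List (List Int)) : Bool :=
  match matrix with
  | [] => false  -- Python raises IndexError on matrix[0]; excluded by Pre_
  | row0 :: _ =>
    let n := matrix.length
    let m := row0.length
    if matrix.any (fun row => row.length ≠ m) then false
    else if (m : Int) > PySem.Int.floordiv ((n : Int) * ((n : Int) - 1)) 2 then false
          -- Python's '/' here: n*(n-1) is even and ≥ 0, so the true division is the exact floor division
    else pvColLoop matrix m (List.range m)

-- ===== PORT B =====
-- zip(*matrix): reached only after the shape check, where every row has length m, so getD is exact
def pvColsOf (matrix : List (List Int)) (m : Nat) : List (List Int) :=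
  (List.range m).map (fun j => matrix.map (fun row => row.getD j 0))

def pvBLoop (seen : PySem.Set (List Int)) : List (List Int) → Bool
  | [] => true
  | c :: rest =>
    if c.countP (fun x => x ≠ 0) ≠ 2 then false
    else if PySem.Set.contains seen c then false
    else pvBLoop (PySem.Set.add seen c) rest

def is_incidence_matrix_alt (matrix : List (List Int)) : Bool :=
  match matrix with
  | [] => false  -- matrix[0] raises IndexError in B too; excluded by Pre_
  | row0 :: _ =>
    let n := matrix.length
    let m := row0.length
    if matrix.any (fun row => row.length ≠ m) then false
    else if 2 * (m : Int) > (n : Int) * ((n : Int) - 1) then false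
    else pvBLoop PySem.Set.empty (pvColsOf matrix m)

-- ===== PRECONDITION & SPEC =====
-- Pre_ excludes only the empty matrix, on which A (and B) raise IndexError at matrix[0].
def Pre_is_incidence_matrix (matrix : List (List Int)) : Prop := matrix ≠ []
instance (matrix : List (List Int)) : Decidable (Pre_is_incidence_matrix matrix) := by
  unfold Pre_is_incidence_matrix; infer_instance

def pvWitness_is_incidence_matrix : List (List Int) := [[1, 1], [1, 0], [0, 1]]

def Spec_is_incidence_matrix (matrix : List (List Int)) (out : Bool) : Prop := out = is_incidence_matrix_alt matrix
instance (matrix : List (List Int)) (out : Bool) : Decidable (Spec_is_incidence_matrix matrix out) := by unfold Spec_is_incidence_matrix; infer_instance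

-- ===== CLAIM (what is proved, stated in full; the proofs are below) =====
def Claim_equal_is_incidence_matrix : Prop := ∀ (matrix : List (List Int)), Dom_is_incidence_matrix matrix → Pre_is_incidence_matrix matrix → Spec_is_incidence_matrix matrix (is_incidence_matrix matrix)

-- ===== LEMMAS AND PROOFS =====

-- nonzero row indices of column j, in increasing order
def pvP (matrix : List (List Int)) (j i : Nat) : Bool := decide (pvEntry matrix i j ≠ 0)

def pvNz (matrix : List (List Int)) (j : Nat) : List Nat :=
  (List.range matrix.length).filter (pvP matrix j)

theorem pvStep_pos (matrix : List (List Int)) (j i : Nat)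
    (c : Nat) (f : Option Nat) (s : Option Nat) (hp : pvP matrix j i = true) :
    pvScanStep matrix j (c, f, s) i =
      match f with
      | none => (c + 1, some i, s)
      | some f0 => (c + 1, some f0, some i) := by
  have hp' : pvEntry matrix i j ≠ 0 := by simpa [pvP] using hp
  cases f <;> simp [pvScanStep, hp']

theorem pvStep_neg (matrix : List (List Int)) (j i : Nat)
    (c : Nat) (f : Option Nat) (s : Option Nat) (hp : pvP matrix j i = false) :
    pvScanStep matrix j (c, f, s) i = (c, f, s) := by
  have hp' : ¬ pvEntry matrix i j ≠ 0 := by simpa [pvP] using hp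
  cases f <;> simp [pvScanStep, hp']

theorem pvScan_fold_some (matrix : List (List Int)) (j : Nat) (l : List Nat)
    (c : Nat) (f : Nat) (s : Option Nat) :
    l.foldl (pvScanStep matrix j) (c, some f, s) =
      (c + (l.filter (pvP matrix j)).length, some f,
        match (l.filter (pvP matrix j)).getLast? with
        | none => s
        | some k => some k) := by
  induction l generalizing c s with
  | nil => simp
  | cons i l ih =>
    rw [List.foldl_cons]
    cases hp : pvP matrix j i with
    | false =>
      rw [pvStep_neg matrix j i c _ s hp, ih, List.filter_cons, hp]
      simp
    | true =>
      rw [pvStep_pos matrix j i c _ s hp, ih, List.filter_cons, hp]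
      simp only [if_true, List.length_cons, List.getLast?_cons]
      cases h : (l.filter (pvP matrix j)).getLast? with
      | none =>
        have hnil : l.filter (pvP matrix j) = [] := List.getLast?_eq_none_iff.mp h
        simp [hnil]
      | some k =>
        exact Prod.ext (by omega) rfl

theorem pvScan_fold_none (matrix : List (List Int)) (j : Nat) (l : List Nat)
    (c : Nat) (s : Option Nat) :
    l.foldl (pvScanStep matrix j) (c, none, s) =
      match l.filter (pvP matrix j) with
      | [] => (c, none, s)
      | i :: F => (c + 1 + F.length, some i,
          match F.getLast? with
          | none => s
          | some k => some k) := by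
  induction l generalizing c s with
  | nil => simp
  | cons i l ih =>
    rw [List.foldl_cons]
    cases hp : pvP matrix j i with
    | false =>
      rw [pvStep_neg matrix j i c _ s hp, ih, List.filter_cons, hp]
      simp
    | true =>
      rw [pvStep_pos matrix j i c _ s hp, List.filter_cons, hp]
      simp only [if_true]
      rw [pvScan_fold_some]

theorem pvScanCol_count (matrix : List (List Int)) (j : Nat) :
    (pvScanCol matrix j).1 = (pvNz matrix j).length := by
  rw [pvScanCol, pvScan_fold_none]
  rcases h : (List.range matrix.length).filter (pvP matrix j) with _ | ⟨i, F⟩ <;>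
    simp [pvNz, h] <;> omega

theorem pvScanCol_two (matrix : List (List Int)) (j i1 i2 : Nat)
    (h : pvNz matrix j = [i1, i2]) :
    pvScanCol matrix j = (2, some i1, some i2) := by
  rw [pvScanCol, pvScan_fold_none]
  rw [pvNz] at h
  rw [h]
  rfl

-- a length-2 pvNz is [i1, i2] with i1 < i2 < n
theorem pvNz_two (matrix : List (List Int)) (j : Nat)
    (h : (pvNz matrix j).length = 2) :
    ∃ i1 i2, i1 < i2 ∧ i2 < matrix.length ∧ pvNz matrix j = [i1, i2] := by
  have hp : (pvNz matrix j).Pairwise (· < ·) :=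
    List.Pairwise.sublist (List.filter_sublist) (List.pairwise_lt_range)
  obtain ⟨a, b, hab⟩ : ∃ a b, pvNz matrix j = [a, b] := by
    rcases e : pvNz matrix j with _ | ⟨a, _ | ⟨b, _ | ⟨c, t⟩⟩⟩ <;> rw [e] at h <;> simp at h
    exact ⟨a, b, rfl⟩
  refine ⟨a, b, ?_, ?_, hab⟩
  · rw [hab] at hp
    simpa using hp
  · have hb : b ∈ pvNz matrix j := by rw [hab]; simp
    have := List.mem_filter.mp hb
    simpa using this.1

theorem pvNz_mem (matrix : List (List Int)) (j i : Nat) :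
    i ∈ pvNz matrix j ↔ i < matrix.length ∧ pvEntry matrix i j ≠ 0 := by
  simp [pvNz, List.mem_filter, pvP]

-- B's per-column count equals the length of pvNz
theorem pvCountD {α : Type} (l : List α) (q : α → Bool) (d : α) :
    (List.range l.length).countP (fun i => q (l.getD i d)) = l.countP q := by
  induction l with
  | nil => simp
  | cons a t ih =>
    rw [List.length_cons, List.range_succ_eq_map, List.countP_cons, List.countP_map]
    have : ((fun i => q ((a :: t).getD i d)) ∘ Nat.succ) = (fun i => q (t.getD i d)) := by
      funext i; simp
    rw [this, ih, List.countP_cons]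
    simp

theorem pvCount_eq_nz (matrix : List (List Int)) (j : Nat) :
    (matrix.map (fun row => row.getD j 0)).countP (fun x => x ≠ 0) = (pvNz matrix j).length := by
  rw [pvNz, ← List.countP_eq_length_filter, List.countP_map]
  have h1 : ((fun x => decide (x ≠ 0)) ∘ fun row : List Int => row.getD j 0)
      = (fun row : List Int => decide (row.getD j 0 ≠ 0)) := rfl
  rw [h1, ← pvCountD matrix (fun row => decide (row.getD j 0 ≠ 0)) []]
  rfl

-- a column is "good" for A: exactly two nonzeros and the duplicate scan clean
def pvGood (matrix : List (List Int)) (m j : Nat) : Prop :=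
  ∃ i1 i2, pvNz matrix j = [i1, i2] ∧ pvDupScan matrix j i1 i2 m = false

theorem pvColLoop_iff (matrix : List (List Int)) (m : Nat) (js : List Nat) :
    pvColLoop matrix m js = true ↔ ∀ j ∈ js, pvGood matrix m j := by
  induction js with
  | nil => simp [pvColLoop]
  | cons j rest ih =>
    rw [pvColLoop]
    by_cases h2 : (pvNz matrix j).length = 2
    · obtain ⟨i1, i2, hlt, hn, he⟩ := pvNz_two matrix j h2
      rw [pvScanCol_two matrix j i1 i2 he]
      simp only [ne_eq, not_true_eq_false, if_false, Option.getD_some]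
      by_cases hd : pvDupScan matrix j i1 i2 m = true
      · rw [if_pos hd]
        constructor
        · intro hfalse; exact absurd hfalse (by simp)
        · intro hall
          obtain ⟨i1', i2', he', hd'⟩ := hall j (by simp)
          rw [he'] at he
          cases he
          rw [hd'] at hd
          cases hd
      · have hd' : pvDupScan matrix j i1 i2 m = false := by
          simpa using hd
        rw [if_neg hd, ih]
        constructor
        · intro hrest
          intro x hx
          rcases List.mem_cons.mp hx with rfl | hx
          · exact ⟨i1, i2, he, hd'⟩
          · exact hrest x hx
        · intro hall x hx
          exact hall x (List.mem_cons_of_mem _ hx)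
    · rcases hsc : pvScanCol matrix j with ⟨c, f, s⟩
      have hc : c ≠ 2 := by
        have hcl := pvScanCol_count matrix j
        rw [hsc] at hcl
        intro h
        rw [h] at hcl
        exact h2 hcl.symm
      simp only [if_pos hc]
      constructor
      · intro hfalse; exact absurd hfalse (by simp)
      · intro hall
        obtain ⟨i1, i2, he, -⟩ := hall j (by simp)
        exact (h2 (by rw [he]; rfl)).elim

theorem pvBLoop_iff (seen : PySem.Set (List Int)) (cols : List (List Int)) :
    pvBLoop seen cols = true ↔
      (∀ c ∈ cols, c.countP (fun x => x ≠ 0) = 2) ∧ cols.Nodup ∧ ∀ c ∈ cols, c ∉ seen := by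
  induction cols generalizing seen with
  | nil => simp [pvBLoop]
  | cons c rest ih =>
    rw [pvBLoop]
    by_cases hc : c.countP (fun x => x ≠ 0) = 2
    · rw [if_neg (by simpa using hc)]
      by_cases hm : PySem.Set.contains seen c = true
      · have hmem : c ∈ seen := (PySem.Set.contains_iff seen c).mp hm
        rw [if_pos hm]
        constructor
        · intro hfalse; exact absurd hfalse (by simp)
        · rintro ⟨-, -, hnot⟩
          exact absurd hmem (hnot c (by simp))
      · have hmem : c ∉ seen := fun h => hm ((PySem.Set.contains_iff seen c).mpr h)
        rw [if_neg hm, ih]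
        constructor
        · rintro ⟨hcnt, hnd, hns⟩
          refine ⟨?_, ?_, ?_⟩
          · intro x hx
            rcases List.mem_cons.mp hx with rfl | hx
            · exact hc
            · exact hcnt x hx
          · refine List.nodup_cons.mpr ⟨?_, hnd⟩
            intro hcr
            have := hns c hcr
            exact this ((PySem.Set.mem_add seen c c).mpr (Or.inr rfl))
          · intro x hx
            rcases List.mem_cons.mp hx with rfl | hx
            · exact hmem
            · intro hxs
              exact (hns x hx) ((PySem.Set.mem_add seen c x).mpr (Or.inl hxs))
        · rintro ⟨hcnt, hnd, hns⟩
          obtain ⟨hcr, hnd'⟩ := List.nodup_cons.mp hnd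
          refine ⟨fun x hx => hcnt x (List.mem_cons_of_mem _ hx), hnd', ?_⟩
          intro x hx hxa
          rcases (PySem.Set.mem_add seen c x).mp hxa with hxs | rfl
          · exact (hns x (List.mem_cons_of_mem _ hx)) hxs
          · exact hcr hx
    · rw [if_pos (by simpa using hc)]
      constructor
      · intro hfalse; exact absurd hfalse (by simp)
      · rintro ⟨hcnt, -, -⟩
        exact absurd (hcnt c (by simp)) hc

-- if column j2 also has exactly two nonzeros, A's duplicate test at (j, j2) means equal columns
theorem pvCond_iff_eq (matrix : List (List Int)) (j j2 i1 i2 : Nat)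
    (h1 : pvNz matrix j = [i1, i2]) (h2 : (pvNz matrix j2).length = 2) :
    ((pvEntry matrix i1 j == pvEntry matrix i1 j2 && pvEntry matrix i2 j == pvEntry matrix i2 j2) = true)
      ↔ matrix.map (fun row => row.getD j 0) = matrix.map (fun row => row.getD j2 0) := by
  have hp : (pvNz matrix j).Pairwise (· < ·) :=
    List.Pairwise.sublist (List.filter_sublist) (List.pairwise_lt_range)
  rw [h1] at hp
  have hlt : i1 < i2 := by simpa using hp
  have h1m : i1 ∈ pvNz matrix j := by rw [h1]; simp
  have h2m : i2 ∈ pvNz matrix j := by rw [h1]; simp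
  obtain ⟨hi1n, hi1nz⟩ := (pvNz_mem matrix j i1).mp h1m
  obtain ⟨hi2n, hi2nz⟩ := (pvNz_mem matrix j i2).mp h2m
  constructor
  · intro hcond
    obtain ⟨he1, he2⟩ : pvEntry matrix i1 j = pvEntry matrix i1 j2 ∧
        pvEntry matrix i2 j = pvEntry matrix i2 j2 := by
      simpa using hcond
    have m1 : i1 ∈ pvNz matrix j2 :=
      (pvNz_mem matrix j2 i1).mpr ⟨hi1n, by rw [← he1]; exact hi1nz⟩
    have m2 : i2 ∈ pvNz matrix j2 :=
      (pvNz_mem matrix j2 i2).mpr ⟨hi2n, by rw [← he2]; exact hi2nz⟩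
    obtain ⟨k1, k2, hk, hkn, hke⟩ := pvNz_two matrix j2 h2
    have hnz2 : pvNz matrix j2 = [i1, i2] := by
      rw [hke] at m1 m2 ⊢
      simp only [List.mem_cons, List.not_mem_nil, or_false] at m1 m2
      have : i1 = k1 ∧ i2 = k2 := by omega
      rw [this.1, this.2]
    apply List.map_inj_left.mpr
    intro row hrow
    obtain ⟨i, hi, hrowi⟩ := List.mem_iff_getElem.mp hrow
    have hrow_e : ∀ jx, row.getD jx 0 = pvEntry matrix i jx := by
      intro jx
      rw [pvEntry, List.getD_eq_getElem matrix [] hi, hrowi]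
    rw [hrow_e j, hrow_e j2]
    by_cases hc1 : i = i1
    · rw [hc1]; exact he1
    by_cases hc2 : i = i2
    · rw [hc2]; exact he2
    have hout1 : i ∉ pvNz matrix j := by rw [h1]; simp [hc1, hc2]
    have hout2 : i ∉ pvNz matrix j2 := by rw [hnz2]; simp [hc1, hc2]
    have z1 : pvEntry matrix i j = 0 := by
      by_contra hz
      exact hout1 ((pvNz_mem matrix j i).mpr ⟨hi, hz⟩)
    have z2 : pvEntry matrix i j2 = 0 := by
      by_contra hz
      exact hout2 ((pvNz_mem matrix j2 i).mpr ⟨hi, hz⟩)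
    rw [z1, z2]
  · intro hmapeq
    have hpt := List.map_inj_left.mp hmapeq
    have e1 : pvEntry matrix i1 j = pvEntry matrix i1 j2 := by
      have := hpt (matrix.getD i1 []) (by rw [List.getD_eq_getElem matrix [] hi1n]; exact List.getElem_mem hi1n)
      simpa [pvEntry] using this
    have e2 : pvEntry matrix i2 j = pvEntry matrix i2 j2 := by
      have := hpt (matrix.getD i2 []) (by rw [List.getD_eq_getElem matrix [] hi2n]; exact List.getElem_mem hi2n)
      simpa [pvEntry] using this
    simp [e1, e2]

-- main bridge: A's column loop over range m equals B's one-pass set loop over the columns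
theorem pvMain (matrix : List (List Int)) (m : Nat) :
    pvColLoop matrix m (List.range m) = pvBLoop PySem.Set.empty (pvColsOf matrix m) := by
  rw [Bool.eq_iff_iff, pvColLoop_iff, pvBLoop_iff]
  constructor
  · intro hall
    refine ⟨?_, ?_, ?_⟩
    · intro c hc
      obtain ⟨j, hjm, rfl⟩ := List.mem_map.mp hc
      obtain ⟨i1, i2, he, -⟩ := hall j hjm
      rw [pvCount_eq_nz, he]
      rfl
    · refine List.pairwise_map.mpr ?_
      refine List.Pairwise.imp_of_mem ?_ (List.pairwise_lt_range)
      intro a b ha hb hab hcoleq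
      obtain ⟨i1, i2, he, hd⟩ := hall a ha
      obtain ⟨k1, k2, he2, -⟩ := hall b hb
      have hbm : b ∈ List.range' (a + 1) (m - (a + 1)) := by
        rw [List.mem_range'_1]
        have := List.mem_range.mp ha
        have := List.mem_range.mp hb
        omega
      have hnot := (List.any_eq_false.mp hd) b hbm
      exact hnot ((pvCond_iff_eq matrix a b i1 i2 he (by rw [he2]; rfl)).mpr hcoleq)
    · intro c hc hcm
      simp [PySem.Set.empty] at hcm
  · rintro ⟨hcnt, hnd, -⟩
    intro j hjm
    have hj : j < m := List.mem_range.mp hjm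
    have hlen2 : (pvNz matrix j).length = 2 := by
      have := hcnt (matrix.map (fun row => row.getD j 0)) (List.mem_map_of_mem hjm)
      rw [pvCount_eq_nz] at this
      exact this
    obtain ⟨i1, i2, hlt, hn, he⟩ := pvNz_two matrix j hlen2
    refine ⟨i1, i2, he, ?_⟩
    apply List.any_eq_false.mpr
    intro j2 hj2m
    obtain ⟨hj2lo, hj2hi⟩ := List.mem_range'_1.mp hj2m
    have hj2 : j2 < m := by omega
    intro hcond
    have hlen2' : (pvNz matrix j2).length = 2 := by
      have := hcnt (matrix.map (fun row => row.getD j2 0)) (List.mem_map_of_mem (List.mem_range.mpr hj2))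
      rw [pvCount_eq_nz] at this
      exact this
    have hcoleq := (pvCond_iff_eq matrix j j2 i1 i2 he hlen2').mp hcond
    have hpw := List.pairwise_map.mp hnd
    have := (List.pairwise_iff_getElem.mp hpw) j j2 (by simpa using hj) (by simpa using hj2) (by omega)
    simp only [List.getElem_range] at this
    exact this hcoleq

-- ===== VERDICT (by name: the statement is the Claim_ definition above) =====
theorem is_incidence_matrix_spec : Claim_equal_is_incidence_matrix := by
  intro matrix _ hpre
  unfold Spec_is_incidence_matrix
  rcases matrix with _ | ⟨row0, tail⟩
  · exact absurd rfl hpre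
  simp only [is_incidence_matrix, is_incidence_matrix_alt]
  by_cases hsh : (row0 :: tail).any (fun row => row.length ≠ row0.length) = true
  · rw [if_pos hsh, if_pos hsh]
  · rw [if_neg hsh, if_neg hsh]
    have hb : ((row0.length : Int) > PySem.Int.floordiv (((row0 :: tail).length : Int) * (((row0 :: tail).length : Int) - 1)) 2)
        ↔ (2 * (row0.length : Int) > ((row0 :: tail).length : Int) * (((row0 :: tail).length : Int) - 1)) := by
      have heven : Even ((((row0 :: tail).length : Int)) * (((row0 :: tail).length : Int) - 1)) := by
        have h := Int.even_mul_succ_self (((row0 :: tail).length : Int) - 1)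
        have he : (((row0 :: tail).length : Int) - 1) * ((((row0 :: tail).length : Int) - 1) + 1)
            = (((row0 :: tail).length : Int)) * (((row0 :: tail).length : Int) - 1) := by ring
        rwa [he] at h
      obtain ⟨r, hr⟩ := heven
      have hfd : PySem.Int.floordiv ((((row0 :: tail).length : Int)) * (((row0 :: tail).length : Int) - 1)) 2 = r := by
        rw [PySem.Int.floordiv_eq_ediv_of_pos (by norm_num), hr]
        omega
      rw [hfd, hr]
      omega
    by_cases hbc : 2 * (row0.length : Int) > ((row0 :: tail).length : Int) * (((row0 :: tail).length : Int) - 1)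
    · rw [if_pos (hb.mpr hbc), if_pos hbc]
    · rw [if_neg (fun h => hbc (hb.mp h)), if_neg hbc]
      exact pvMain (row0 :: tail) row0.length
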